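-- pv_equiv track=rewrite | github.com/Hollyys/coding_Practice | python/practice/16.py | solution
-- ===== SOURCE A (Python) =====
-- from collections import deque
--
-- def solution(progresses, speeds):
--     answer = []
--     q = deque()
--     n = len(progresses)
--
--     for i in range(n):
--         if (100-progresses[i])%speeds[i] != 0:
--             left = (100-progresses[i])//speeds[i]+1
--         else:
--             left = (100-progresses[i])//speeds[i]
--         q.append(left)
--
--     max = q.popleft()
--     cnt = 1
--     while q:
--         pop = q.popleft()
--         if pop <= max:
--             cnt += 1
--         else:
--             max = pop
--             answer.append(cnt)
--             cnt = 1
--     answer.append(cnt)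
--
--     return answer
-- ===== SOURCE B (Python) =====
-- def solution(progresses, speeds):
--     days = [(100 - p) // s + ((100 - p) % s != 0) for p, s in zip(progresses, speeds)]
--
--     def groups(ds):
--         if not ds:
--             return []
--         k = 1
--         while k < len(ds) and ds[k] <= ds[0]:
--             k += 1
--         return [k] + groups(ds[k:])
--
--     return groups(days)
-- ===== Notes on version B (the rewrite author's own statement) =====
-- stated objective: alternative
-- what changed: B replaces A's deque-consuming scan with running max and counter by a recursive divide: it builds the finish-day table once, then recursively finds the first index whose day exceeds the head (that index is the group size) and recurses on the remaining suffix; no deque, no running max, no counter state.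
import Mathlib
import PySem

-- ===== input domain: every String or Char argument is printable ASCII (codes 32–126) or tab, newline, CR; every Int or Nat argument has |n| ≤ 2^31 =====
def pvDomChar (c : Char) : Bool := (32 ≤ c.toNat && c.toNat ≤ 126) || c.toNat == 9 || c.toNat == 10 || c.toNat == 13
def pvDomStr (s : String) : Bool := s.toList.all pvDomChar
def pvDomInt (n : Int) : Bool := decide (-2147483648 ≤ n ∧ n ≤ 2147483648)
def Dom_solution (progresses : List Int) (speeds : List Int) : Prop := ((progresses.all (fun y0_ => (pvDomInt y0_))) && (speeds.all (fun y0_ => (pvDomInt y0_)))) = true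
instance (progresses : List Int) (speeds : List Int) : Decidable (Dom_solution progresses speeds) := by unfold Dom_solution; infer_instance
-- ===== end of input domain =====

-- B drops A's deque + running-max/counter scan for a recursive split at each group boundary; objective: alternative decomposition, same cost.

-- ===== PORT A =====
-- finish-day formula of A's first loop body ('left = ...')
def solA_day (progresses : List Int) (speeds : List Int) (i : Int) : Int :=
  if PySem.Int.mod (100 - PySem.List.pyGetD progresses i 0) (PySem.List.pyGetD speeds i 0) ≠ 0 then
    PySem.Int.floordiv (100 - PySem.List.pyGetD progresses i 0) (PySem.List.pyGetD speeds i 0) + 1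
  else
    PySem.Int.floordiv (100 - PySem.List.pyGetD progresses i 0) (PySem.List.pyGetD speeds i 0)

-- A's 'while q:' loop over the deque, state (max, cnt, answer); final 'answer.append(cnt)'
def solA_loop : List Int → Int → Int → List Int → List Int
  | [], _, cnt, answer => answer ++ [cnt]
  | pop :: q, mx, cnt, answer =>
      if pop ≤ mx then solA_loop q mx (cnt + 1) answer
      else solA_loop q pop 1 (answer ++ [cnt])

def solution (progresses : List Int) (speeds : List Int) : List Int :=
  let n : Int := progresses.length
  let q := (PySem.List.pyRange 0 n 1).foldl (fun q i => q ++ [solA_day progresses speeds i]) []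
  match q with
  | [] => []   -- Python raises IndexError on 'q.popleft()' here; excluded by Pre_solution
  | mx :: rest => solA_loop rest mx 1 []

-- ===== PORT B =====
-- 'days = [(100-p)//s + ((100-p)%s != 0) for p, s in zip(progresses, speeds)]'
def solB_days (progresses : List Int) (speeds : List Int) : List Int :=
  (progresses.zip speeds).map (fun ps =>
    PySem.Int.floordiv (100 - ps.1) ps.2 +
      (if PySem.Int.mod (100 - ps.1) ps.2 ≠ 0 then 1 else 0))

-- the 'while k < len(ds) and ds[k] <= ds[0]: k += 1' search: length of the leading run ≤ d0
def solB_run (d0 : Int) : List Int → Nat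
  | [] => 0
  | x :: xs => if x ≤ d0 then solB_run d0 xs + 1 else 0

-- 'groups(ds)': empty → [], else group of size k (head + its run), recurse on ds[k:]
def solB_groups : List Int → List Int
  | [] => []
  | d :: rest =>
      let k := solB_run d rest
      ((k : Int) + 1) :: solB_groups (rest.drop k)
  termination_by ds => ds.length
  decreasing_by simp

def solution_alt (progresses : List Int) (speeds : List Int) : List Int :=
  solB_groups (solB_days progresses speeds)

-- ===== PRECONDITION & SPEC =====
-- Pre_ excludes exactly the inputs where the Python A raises: empty progresses (IndexError on popleft),
-- speeds shorter than progresses (IndexError), or a zero speed used by the loop (ZeroDivisionError).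
def Pre_solution (progresses : List Int) (speeds : List Int) : Prop :=
  progresses ≠ [] ∧ progresses.length ≤ speeds.length ∧
    ∀ s ∈ speeds.take progresses.length, s ≠ 0
instance (progresses : List Int) (speeds : List Int) : Decidable (Pre_solution progresses speeds) := by
  unfold Pre_solution; infer_instance
def pvWitness_solution : List Int × List Int := ([93, 30, 55], [1, 30, 5])

def Spec_solution (progresses : List Int) (speeds : List Int) (out : List Int) : Prop := out = solution_alt progresses speeds
instance (progresses : List Int) (speeds : List Int) (out : List Int) : Decidable (Spec_solution progresses speeds out) := by unfold Spec_solution; infer_instance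

-- ===== CLAIM =====
def Claim_equal_solution : Prop := ∀ (progresses : List Int) (speeds : List Int), Dom_solution progresses speeds → Pre_solution progresses speeds → Spec_solution progresses speeds (solution progresses speeds)

-- ===== LEMMAS AND PROOFS =====

theorem solB_groups_cons (d : Int) (rest : List Int) :
    solB_groups (d :: rest) =
      ((solB_run d rest : Int) + 1) :: solB_groups (rest.drop (solB_run d rest)) := by
  rw [solB_groups.eq_def]

theorem solB_groups_nil : solB_groups [] = [] := by
  rw [solB_groups.eq_def]

-- A's running-max/counter loop produces exactly B's boundary-split groups
theorem solA_loop_eq (L : List Int) : ∀ (mx cnt : Int) (ans : List Int),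
    solA_loop L mx cnt ans =
      ans ++ (cnt + (solB_run mx L : Int)) :: solB_groups (L.drop (solB_run mx L)) := by
  induction L with
  | nil => intro mx cnt ans; simp [solA_loop, solB_run, solB_groups_nil]
  | cons x xs ih =>
      intro mx cnt ans
      by_cases h : x ≤ mx
      · have : (cnt + 1) + (solB_run mx xs : Int) = cnt + ((solB_run mx xs : Int) + 1) := by ring
        simp [solA_loop, solB_run, h, ih, this]
      · simp only [solA_loop, solB_run, h, if_false, if_neg h, ih, solB_groups_cons,
          Nat.cast_zero, add_zero, List.drop_zero]
        have : (1 : Int) + (solB_run x xs : Int) = (solB_run x xs : Int) + 1 := by ring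
        simp [this]

-- the day table A builds equals B's zip comprehension
theorem days_eq (progresses speeds : List Int)
    (hlen : progresses.length ≤ speeds.length) :
    (PySem.List.pyRange 0 (progresses.length : Int) 1).map (solA_day progresses speeds) =
      solB_days progresses speeds := by
  apply List.ext_getElem
  · simp [PySem.List.length_pyRange_one, solB_days]
    omega
  · intro k hk1 hk2
    have hkp : k < progresses.length := by
      simpa [PySem.List.length_pyRange_one] using hk1
    have hks : k < speeds.length := lt_of_lt_of_le hkp hlen
    rw [List.getElem_map, PySem.List.getElem_pyRange_one]
    simp only [solB_days, List.getElem_map, List.getElem_zip]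
    simp [solA_day, PySem.List.pyGetD_natCast, hkp, hks]
    split_ifs <;> ring

theorem solution_spec : Claim_equal_solution := by
  intro progresses speeds _ hpre
  unfold Spec_solution
  obtain ⟨hne, hlen, -⟩ := hpre
  simp only [solution, solution_alt]
  rw [PySem.List.foldl_append_singleton_eq_map, List.nil_append, days_eq progresses speeds hlen]
  have hzlen : (solB_days progresses speeds).length = progresses.length := by
    simp [solB_days]; omega
  cases hd : solB_days progresses speeds with
  | nil =>
      exfalso
      apply hne
      have := hzlen
      rw [hd] at this
      exact List.eq_nil_of_length_eq_zero this.symm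
  | cons mx rest =>
      show solA_loop rest mx 1 [] = solB_groups (mx :: rest)
      rw [solA_loop_eq, solB_groups_cons, List.nil_append]
      have : (1 : Int) + (solB_run mx rest : Int) = (solB_run mx rest : Int) + 1 := by ring
      simp [this]
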